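-- pv_equiv track=rewrite | github.com/moe-sasi/HOA_Report | hoa_report/engine.py | _values_disagree
-- ===== SOURCE A (Python) =====
-- from collections.abc import Sequence
--
-- def _is_blank(value: object) -> bool:
--     if value is None:
--         return True
--     if isinstance(value, str):
--         return not value.strip()
--     if isinstance(value, float) and value != value:
--         return True
--     return False
--
-- def _normalize_discrepancy_value(value: object) -> object | None:
--     if _is_blank(value):
--         return None
--     if isinstance(value, str):
--         return value.strip()
--     return value
--
-- def _values_disagree(values: Sequence[object]) -> bool:
--     seen: list[object] = []
--     for raw_value in values:
--         value = _normalize_discrepancy_value(raw_value)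
--         if value is None:
--             continue
--         if all(value != existing for existing in seen):
--             seen.append(value)
--             if len(seen) > 1:
--                 return True
--     return False
-- ===== SOURCE B (Python) =====
-- def _normalize_discrepancy_value(value):
--     if value is None:
--         return None
--     if isinstance(value, str):
--         stripped = value.strip()
--         return stripped if stripped else None
--     if isinstance(value, float) and value != value:
--         return None
--     return value
--
-- def _values_disagree(values):
--     normalized = [n for n in (_normalize_discrepancy_value(v) for v in values) if n is not None]
--     if not normalized:
--         return False
--     first = normalized[0]
--     return any(n != first for n in normalized)
-- ===== Notes on version B (the rewrite author's own statement) =====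
-- stated objective: simpler
-- what changed: Replaces the growing 'seen' list with membership scan and early return by a two-phase build-then-compare: collect all normalized non-blank values in one pass, then check whether any differs from the first.
import Mathlib
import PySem

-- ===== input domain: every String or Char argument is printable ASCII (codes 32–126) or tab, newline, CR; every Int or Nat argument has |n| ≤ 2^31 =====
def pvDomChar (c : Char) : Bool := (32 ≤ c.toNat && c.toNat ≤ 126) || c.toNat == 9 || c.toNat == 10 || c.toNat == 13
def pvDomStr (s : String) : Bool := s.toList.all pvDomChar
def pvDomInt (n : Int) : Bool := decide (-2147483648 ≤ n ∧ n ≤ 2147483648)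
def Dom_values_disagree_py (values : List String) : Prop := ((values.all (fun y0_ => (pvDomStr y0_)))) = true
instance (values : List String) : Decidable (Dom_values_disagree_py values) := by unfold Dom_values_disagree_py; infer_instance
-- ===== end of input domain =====

-- B builds the normalized list in one pass and compares all to its first element,
-- replacing A's growing 'seen' list with early return; objective: simpler decomposition.


-- ===== PORT A =====
-- _is_blank for a string value: true iff value.strip() is empty
def isBlankA (value : String) : Bool := (PySem.Str.strip value).length == 0

-- _normalize_discrepancy_value for a string value
def normalizeA (value : String) : Option String :=
  if isBlankA value then none else some (PySem.Str.strip value)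

-- the for-loop over values with accumulator 'seen' and early return on len(seen) > 1
def valuesDisagreeLoopA (seen : List String) : List String → Bool
  | [] => false
  | raw :: rest =>
    match normalizeA raw with
    | none => valuesDisagreeLoopA seen rest
    | some v =>
      if seen.all (fun existing => v ≠ existing) then
        let seen' := seen ++ [v]
        if seen'.length > 1 then true else valuesDisagreeLoopA seen' rest
      else
        valuesDisagreeLoopA seen rest

def values_disagree_py (values : List String) : Bool := valuesDisagreeLoopA [] values

-- ===== PORT B =====
def normalizeB (value : String) : Option String :=
  let stripped := PySem.Str.strip value
  if stripped.length == 0 then none else some stripped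

def values_disagree_py_alt (values : List String) : Bool :=
  let normalized := values.filterMap normalizeB
  match normalized with
  | [] => false
  | first :: _ => normalized.any (fun n => n ≠ first)

-- ===== PRECONDITION & SPEC =====
def Spec_values_disagree_py (values : List String) (out : Bool) : Prop := out = values_disagree_py_alt values
instance (values : List String) (out : Bool) : Decidable (Spec_values_disagree_py values out) := by unfold Spec_values_disagree_py; infer_instance

-- ===== CLAIM (what is proved, stated in full; the proofs are below) =====
def Claim_equal_values_disagree_py : Prop := ∀ (values : List String), Dom_values_disagree_py values → Spec_values_disagree_py values (values_disagree_py values)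

-- ===== LEMMAS AND PROOFS =====
theorem normalizeA_eq_normalizeB (v : String) : normalizeA v = normalizeB v := by
  simp [normalizeA, normalizeB, isBlankA]

theorem loop_single (x : String) (vs : List String) :
    valuesDisagreeLoopA [x] vs = (vs.filterMap normalizeB).any (fun n => n ≠ x) := by
  induction vs with
  | nil => simp [valuesDisagreeLoopA]
  | cons v rest ih =>
    simp only [valuesDisagreeLoopA, normalizeA_eq_normalizeB, List.filterMap_cons]
    cases h : normalizeB v with
    | none => simpa using ih
    | some y =>
      by_cases hy : y = x
      · subst hy
        simp [List.all, ih]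
      · simp [List.all, hy]

theorem loop_nil (vs : List String) :
    valuesDisagreeLoopA [] vs = values_disagree_py_alt vs := by
  induction vs with
  | nil => simp [valuesDisagreeLoopA, values_disagree_py_alt]
  | cons v rest ih =>
    simp only [valuesDisagreeLoopA, normalizeA_eq_normalizeB]
    cases h : normalizeB v with
    | none =>
      simp only [values_disagree_py_alt, List.filterMap_cons, h] at *
      exact ih
    | some y =>
      simp only [List.all_nil, if_true, List.nil_append, List.length_cons,
        List.length_nil]
      simp only [values_disagree_py_alt, List.filterMap_cons, h]
      simp [loop_single, List.any_cons]

-- ===== VERDICT (by name: the statement is the Claim_ definition above) =====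
theorem values_disagree_py_spec : Claim_equal_values_disagree_py := by
  intro values _
  unfold Spec_values_disagree_py values_disagree_py
  exact loop_nil values
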